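-- pv_equiv track=rewrite | github.com/DJV512/Advent-of-Code-2017 | Day11/main.py | part2
-- ===== SOURCE A (Python) =====
-- def part2(data):
--
--     position = (0,0)
--     max_dist = 0
--     for direction in data:
--         if direction == "ne":
--             position = (position[0]-1, position[1]+1)
--         elif direction == "nw":
--             position = (position[0]-1, position[1]-1)
--         elif direction == "sw":
--             position = (position[0]+1, position[1]-1)
--         elif direction == "se":
--             position = (position[0]+1, position[1]+1)
--         elif direction == "s":
--             position = (position[0]+1, position[1])
--         elif direction == "n":
--             position = (position[0]-1, position[1])
--
--         if abs(position[0]) > max_dist: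
--             max_dist = abs(position[0])
--         if abs(position[1]) > max_dist:
--             max_dist = abs(position[1])
--
--     return max_dist
-- ===== SOURCE B (Python) =====
-- # Per-axis deltas: x and y components are handled independently.
-- _X = {"ne": -1, "nw": -1, "sw": 1, "se": 1, "s": 1, "n": -1}
-- _Y = {"ne": 1, "nw": -1, "sw": -1, "se": 1}
--
-- def _max_abs_prefix(deltas):
--     # max |prefix sum| via running min/max of the signed prefix sum (no abs per step)
--     s = lo = hi = 0
--     for d in deltas:
--         s += d
--         if s < lo:
--             lo = s
--         if s > hi:
--             hi = s
--     return max(hi, -lo)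
--
-- def part2(data):
--     # max_k max(|X_k|,|Y_k|) = max(max_k |X_k|, max_k |Y_k|): the axes decouple.
--     return max(_max_abs_prefix(_X.get(d, 0) for d in data),
--                _max_abs_prefix(_Y.get(d, 0) for d in data))
-- ===== Notes on version B (the rewrite author's own statement) =====
-- stated objective: alternative
-- what changed: Decouples the two coordinates into two independent passes; each pass tracks only the running min and max of the signed prefix sum (no abs or distance comparison per step) and takes max(hi,-lo) once at the end, instead of A's fused loop updating a 2-D position and comparing |x|,|y| against a running max after every step.
import Mathlib
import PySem

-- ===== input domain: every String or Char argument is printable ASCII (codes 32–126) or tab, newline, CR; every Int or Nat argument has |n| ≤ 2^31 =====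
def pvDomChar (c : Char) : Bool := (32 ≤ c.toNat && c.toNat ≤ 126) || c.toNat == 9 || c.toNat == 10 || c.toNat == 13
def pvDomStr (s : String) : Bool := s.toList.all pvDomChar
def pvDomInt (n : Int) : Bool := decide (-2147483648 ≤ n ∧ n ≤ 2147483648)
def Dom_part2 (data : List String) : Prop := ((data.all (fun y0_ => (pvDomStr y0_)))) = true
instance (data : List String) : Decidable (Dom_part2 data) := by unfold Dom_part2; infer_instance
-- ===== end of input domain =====

-- B decouples the axes into two independent passes, each tracking only the running min/max of
-- the signed prefix sum (abs taken once at the end), instead of A's fused per-step |x|,|y| tracking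
-- (objective: alternative algorithm).


-- ===== PORT A =====
-- literal transliteration: one fold carrying (position, max_dist), chained branches, two abs checks
def part2 (data : List String) : Int :=
  (data.foldl (fun (st : (Int × Int) × Int) direction =>
    let position := st.1
    let max_dist := st.2
    let position :=
      if direction == "ne" then (position.1 - 1, position.2 + 1)
      else if direction == "nw" then (position.1 - 1, position.2 - 1)
      else if direction == "sw" then (position.1 + 1, position.2 - 1)
      else if direction == "se" then (position.1 + 1, position.2 + 1)
      else if direction == "s" then (position.1 + 1, position.2)
      else if direction == "n" then (position.1 - 1, position.2)
      else position
    let max_dist := if |position.1| > max_dist then |position.1| else max_dist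
    let max_dist := if |position.2| > max_dist then |position.2| else max_dist
    (position, max_dist)) ((0, 0), 0)).2

-- ===== PORT B =====
-- per-axis delta tables (Python dicts _X, _Y)
def pvX : PySem.Dict String Int :=
  PySem.Dict.ofList [("ne", -1), ("nw", -1), ("sw", 1), ("se", 1), ("s", 1), ("n", -1)]
def pvY : PySem.Dict String Int :=
  PySem.Dict.ofList [("ne", 1), ("nw", -1), ("sw", -1), ("se", 1)]

-- _max_abs_prefix: running min/max of the signed prefix sum, abs once at the end
def maxAbsPrefix (deltas : List Int) : Int :=
  let st := deltas.foldl (fun (st : Int × Int × Int) d =>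
      let s := st.1 + d
      let lo := if s < st.2.1 then s else st.2.1
      let hi := if s > st.2.2 then s else st.2.2
      (s, lo, hi)) (0, 0, 0)
  max st.2.2 (-st.2.1)

def part2_alt (data : List String) : Int :=
  max (maxAbsPrefix (data.map (fun d => pvX.getD d 0)))
      (maxAbsPrefix (data.map (fun d => pvY.getD d 0)))

-- ===== PRECONDITION & SPEC =====
def Spec_part2 (data : List String) (out : Int) : Prop := out = part2_alt data
instance (data : List String) (out : Int) : Decidable (Spec_part2 data out) := by unfold Spec_part2; infer_instance

-- ===== CLAIM (what is proved, stated in full; the proofs are below) =====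
def Claim_equal_part2 : Prop := ∀ (data : List String), Dom_part2 data → Spec_part2 data (part2 data)

-- ===== LEMMAS AND PROOFS =====

-- the dict lookups as chains of string tests
theorem getD_pvX (d : String) : pvX.getD d 0 =
    if d = "ne" then (-1 : Int) else if d = "nw" then -1 else if d = "sw" then 1
    else if d = "se" then 1 else if d = "s" then 1 else if d = "n" then -1 else 0 := by
  simp only [pvX, PySem.Dict.ofList, PySem.Dict.update, List.foldl]
  rw [PySem.Dict.getD_insert, PySem.Dict.getD_insert, PySem.Dict.getD_insert,
      PySem.Dict.getD_insert, PySem.Dict.getD_insert, PySem.Dict.getD_insert, PySem.Dict.getD_empty]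
  split_ifs <;> simp_all

theorem getD_pvY (d : String) : pvY.getD d 0 =
    if d = "ne" then (1 : Int) else if d = "nw" then -1 else if d = "sw" then -1
    else if d = "se" then 1 else 0 := by
  simp only [pvY, PySem.Dict.ofList, PySem.Dict.update, List.foldl]
  rw [PySem.Dict.getD_insert, PySem.Dict.getD_insert, PySem.Dict.getD_insert,
      PySem.Dict.getD_insert, PySem.Dict.getD_empty]
  split_ifs <;> simp_all

-- A's branch chain moves by exactly the per-axis deltas
theorem stepA_eq_deltas (x y : Int) (d : String) :
    (if d == "ne" then (x - 1, y + 1)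
     else if d == "nw" then (x - 1, y - 1)
     else if d == "sw" then (x + 1, y - 1)
     else if d == "se" then (x + 1, y + 1)
     else if d == "s" then (x + 1, y)
     else if d == "n" then (x - 1, y)
     else (x, y)) = (x + pvX.getD d 0, y + pvY.getD d 0) := by
  rw [getD_pvX, getD_pvY]
  split_ifs <;> simp_all <;> omega

-- A's two conditional updates as a max with the step's Chebyshev score
theorem two_ifs_eq_max (m a b : Int) :
    (if |b| > (if |a| > m then |a| else m) then |b| else (if |a| > m then |a| else m))
    = max m (max |a| |b|) := by split_ifs <;> omega

-- per-axis: extending the extrema by the new sum adds |s| to the axis value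
theorem axstep (s lo hi : Int) : max (max hi s) (-(min lo s)) = max (max hi (-lo)) |s| := by
  rcases abs_cases s with ⟨h, _⟩ | ⟨h, _⟩ <;> rw [h] <;> omega

theorem maxswap (P Q u v : Int) : max (max P Q) (max u v) = max (max P u) (max Q v) := by omega

-- one step of A's max_dist update, in terms of the per-axis extrema
theorem step_max (a b lo hi lo' hi' : Int) :
    (if |b| > (if |a| > max (max hi (-lo)) (max hi' (-lo')) then |a|
               else max (max hi (-lo)) (max hi' (-lo'))) then |b|
     else (if |a| > max (max hi (-lo)) (max hi' (-lo')) then |a|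
           else max (max hi (-lo)) (max hi' (-lo'))))
    = max (max (max hi a) (-(min lo a))) (max (max hi' b) (-(min lo' b))) := by
  rw [two_ifs_eq_max, axstep, axstep, maxswap]

-- the combined invariant: A's fused fold equals the two per-axis min/max folds,
-- provided the running max_dist is the Chebyshev value of the four extrema
theorem fused_eq_axes (l : List String) (x y loX hiX loY hiY : Int) :
    (l.foldl (fun (st : (Int × Int) × Int) direction =>
      let position := st.1
      let max_dist := st.2
      let position :=
        if direction == "ne" then (position.1 - 1, position.2 + 1)
        else if direction == "nw" then (position.1 - 1, position.2 - 1)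
        else if direction == "sw" then (position.1 + 1, position.2 - 1)
        else if direction == "se" then (position.1 + 1, position.2 + 1)
        else if direction == "s" then (position.1 + 1, position.2)
        else if direction == "n" then (position.1 - 1, position.2)
        else position
      let max_dist := if |position.1| > max_dist then |position.1| else max_dist
      let max_dist := if |position.2| > max_dist then |position.2| else max_dist
      (position, max_dist)) ((x, y), max (max hiX (-loX)) (max hiY (-loY)))).2
    = (let sx := (l.map (fun d => pvX.getD d 0)).foldl (fun (st : Int × Int × Int) d =>
          let s := st.1 + d
          let lo := if s < st.2.1 then s else st.2.1
          let hi := if s > st.2.2 then s else st.2.2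
          (s, lo, hi)) (x, loX, hiX)
       let sy := (l.map (fun d => pvY.getD d 0)).foldl (fun (st : Int × Int × Int) d =>
          let s := st.1 + d
          let lo := if s < st.2.1 then s else st.2.1
          let hi := if s > st.2.2 then s else st.2.2
          (s, lo, hi)) (y, loY, hiY)
       max (max sx.2.2 (-sx.2.1)) (max sy.2.2 (-sy.2.1))) := by
  induction l generalizing x y loX hiX loY hiY with
  | nil => simp
  | cons d t ih =>
    simp only [List.map_cons, List.foldl_cons]
    rw [stepA_eq_deltas]
    have hx : (if x + pvX.getD d 0 < loX then x + pvX.getD d 0 else loX) = min loX (x + pvX.getD d 0) := by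
      split_ifs <;> omega
    have hy : (if y + pvY.getD d 0 < loY then y + pvY.getD d 0 else loY) = min loY (y + pvY.getD d 0) := by
      split_ifs <;> omega
    have hhx : (if x + pvX.getD d 0 > hiX then x + pvX.getD d 0 else hiX) = max hiX (x + pvX.getD d 0) := by
      split_ifs <;> omega
    have hhy : (if y + pvY.getD d 0 > hiY then y + pvY.getD d 0 else hiY) = max hiY (y + pvY.getD d 0) := by
      split_ifs <;> omega
    rw [show ((x + pvX.getD d 0, y + pvY.getD d 0) : Int × Int).1 = x + pvX.getD d 0 from rfl,
        show ((x + pvX.getD d 0, y + pvY.getD d 0) : Int × Int).2 = y + pvY.getD d 0 from rfl,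
        step_max, hx, hy, hhx, hhy]
    exact ih _ _ _ _ _ _

-- ===== VERDICT (by name: the statement is the Claim_ definition above) =====
theorem part2_spec : Claim_equal_part2 := by
  unfold Claim_equal_part2
  intro data _
  unfold Spec_part2 part2 part2_alt maxAbsPrefix
  have := fused_eq_axes data 0 0 0 0 0 0
  simpa using this
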